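-- pv_equiv track=rewrite | github.com/Purnendu17/Python_Programming | algorithmic/max.py | max_score_split
-- ===== SOURCE A (Python) =====
-- def max_score_split(s):
--     max_score = 0
--
--     for i in range(1, len(s)):  # Split points from 1 to len(s)-1
--         left = s[:i]  # Left substring
--         right = s[i:]  # Right substring
--
--         # Count zeros in the left substring and ones in the right substring
--         score = left.count('0') + right.count('1')
--
--         # Update the maximum score
--         max_score = max(max_score, score)
--
--     return max_score
-- ===== SOURCE B (Python) =====
-- def max_score_split(s):
--     zeros = 0
--     ones_right = s.count('1')
--     best = 0
--     for c in s[:-1]: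
--         if c == '0':
--             zeros += 1
--         elif c == '1':
--             ones_right -= 1
--         best = max(best, zeros + ones_right)
--     return best
-- ===== Notes on version B (the rewrite author's own statement) =====
-- stated objective: faster
-- what changed: Replaced the quadratic loop that slices the string at every split point and re-counts both halves with a single left-to-right pass maintaining a running zero count, a remaining-ones count, and the best score.
import Mathlib
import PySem

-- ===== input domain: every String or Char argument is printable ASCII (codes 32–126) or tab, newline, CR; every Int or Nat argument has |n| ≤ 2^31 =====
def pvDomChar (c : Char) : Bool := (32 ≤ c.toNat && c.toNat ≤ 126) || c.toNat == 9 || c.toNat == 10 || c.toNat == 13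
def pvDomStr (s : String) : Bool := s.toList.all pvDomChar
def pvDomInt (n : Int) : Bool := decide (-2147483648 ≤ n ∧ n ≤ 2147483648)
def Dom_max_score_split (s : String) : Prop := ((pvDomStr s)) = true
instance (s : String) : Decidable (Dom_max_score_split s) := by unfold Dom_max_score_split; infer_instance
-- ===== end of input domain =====

-- B replaces A's quadratic split-point scan (re-counting both substrings at every split)
-- by one linear pass with a running zero count and remaining-ones count; equal return values proved.


-- ===== PORT A =====
-- for i in range(1, len(s)): score = s[:i].count('0') + s[i:].count('1'); max_score = max(max_score, score)
def max_score_split (s : String) : Int :=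
  (PySem.List.pyRange 1 (PySem.Str.len s) 1).foldl
    (fun max_score i =>
      let left := PySem.Str.slice s none (some i)
      let right := PySem.Str.slice s (some i) none
      let score : Int := (PySem.Str.count left "0" : Int) + (PySem.Str.count right "1" : Int)
      max max_score score) 0

-- ===== PORT B =====
-- single pass over s[:-1] carrying (zeros, ones_right, best); ones_right starts at s.count('1')
def max_score_split_alt (s : String) : Int :=
  ((PySem.Str.slice s none (some (-1))).toList.foldl
    (fun (st : Int × Int × Int) c =>
      let zo := if c = '0' then (st.1 + 1, st.2.1)
                else if c = '1' then (st.1, st.2.1 - 1)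
                else (st.1, st.2.1)
      (zo.1, zo.2, max st.2.2 (zo.1 + zo.2)))
    (0, (PySem.Str.count s "1" : Int), 0)).2.2

-- ===== PRECONDITION & SPEC =====
def Spec_max_score_split (s : String) (out : Int) : Prop := out = max_score_split_alt s
instance (s : String) (out : Int) : Decidable (Spec_max_score_split s out) := by unfold Spec_max_score_split; infer_instance

-- ===== CLAIM (what is proved, stated in full; the proofs are below) =====
def Claim_equal_max_score_split : Prop := ∀ (s : String), Dom_max_score_split s → Spec_max_score_split s (max_score_split s)

-- ===== LEMMAS AND PROOFS =====

-- Python's str.count for a single-character needle is List.count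
lemma count_go_single (c : Char) (l : List Char) : ∀ (fuel acc : Nat), l.length ≤ fuel →
    PySem.Chars.count.go [c] fuel l acc = acc + l.count c := by
  induction l with
  | nil => intro fuel acc _; cases fuel <;> simp [PySem.Chars.count.go]
  | cons x t ih =>
    intro fuel acc h
    cases fuel with
    | zero => simp at h
    | succ f =>
      simp only [PySem.Chars.count.go]
      by_cases hx : x = c
      · subst hx
        simp only [List.isPrefixOf, BEq.rfl, Bool.true_and, List.isPrefixOf_nil_left, if_true]
        rw [show List.drop [x].length (x :: t) = t from rfl, ih f (acc + 1) (by simpa using h)]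
        simp [List.count_cons]; omega
      · have : ([c].isPrefixOf (x :: t)) = false := by
          simp [List.isPrefixOf]; exact fun h' => absurd h'.symm hx
        rw [this]; simp only [if_false, Bool.false_eq_true]
        rw [ih f acc (by simpa using h)]
        simp [List.count_cons, hx]

lemma count_single (c : Char) (l : List Char) : PySem.Chars.count l [c] = l.count c := by
  simp [PySem.Chars.count, count_go_single c l l.length 0 le_rfl]

-- loop invariant: after m steps B's state is (zeros of take m, ones of drop m, A's running max over splits 1..m)
lemma inv_lemma (L : List Char) (m : Nat) (hm : m ≤ L.length) :
    (L.take m).foldl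
      (fun (st : Int × Int × Int) c =>
        let zo := if c = '0' then (st.1 + 1, st.2.1)
                  else if c = '1' then (st.1, st.2.1 - 1)
                  else (st.1, st.2.1)
        (zo.1, zo.2, max st.2.2 (zo.1 + zo.2)))
      (0, (L.count '1' : Int), 0)
    = (((L.take m).count '0' : Int), ((L.drop m).count '1' : Int),
       (List.range m).foldl
         (fun ms k => max ms (((L.take (1 + k)).count '0' : Int) + ((L.drop (1 + k)).count '1' : Int))) 0) := by
  induction m with
  | zero => simp
  | succ m ih =>
    have hm' : m ≤ L.length := by omega
    have hlt : m < L.length := by omega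
    have htake : L.take (m + 1) = L.take m ++ [L[m]] := List.take_succ_eq_append_getElem hlt
    have hdrop : L.drop m = L[m] :: L.drop (m + 1) := (List.drop_eq_getElem_cons hlt)
    have h10 : 1 + m = m + 1 := by omega
    rw [List.range_succ, List.foldl_append, htake, List.foldl_append, ih hm']
    simp only [List.foldl_cons, List.foldl_nil, h10, htake, hdrop, List.count_append,
      List.count_cons, List.count_nil, Prod.mk.injEq]
    by_cases h0 : L[m] = '0' <;> by_cases h1 : L[m] = '1' <;>
      simp only [h0, h1, if_true, if_false] <;>
      push_cast <;>
      refine ⟨by simp [h0, h1], by simp [h0, h1], ?_⟩ <;>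
      · congr 1 <;> simp [h0, h1] <;> ring

-- ===== VERDICT (by name: the statement is the Claim_ definition above) =====
theorem max_score_split_spec : Claim_equal_max_score_split := by
  intro s _
  unfold Spec_max_score_split max_score_split max_score_split_alt
  -- B side: s[:-1] is dropLast = take (n-1); starting ones count is List.count
  rw [show (PySem.Str.slice s none (some (-1))).toList = s.toList.dropLast from
        PySem.Str.slice_to_neg_one s]
  rw [List.dropLast_eq_take]
  rw [show (PySem.Str.count s "1" : Int) = (s.toList.count '1' : Int) by
        simp [PySem.Str.count_eq, count_single]]
  rw [inv_lemma s.toList (s.toList.length - 1) (by omega)]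
  -- A side: unfold the range loop to the same Nat-indexed fold over counts
  rw [show PySem.Str.len s = (s.toList.length : Int) from by simp [pysem]]
  rw [PySem.List.pyRange_one]
  rw [show ((s.toList.length : Int) - 1).toNat = s.toList.length - 1 by omega]
  rw [List.foldl_map]
  congr 1
  funext ms k
  have h1 : (1 : Int) + (k : Int) = ((1 + k : Nat) : Int) := by push_cast; ring
  simp only [h1, PySem.Str.count_eq, PySem.Str.toList_slice, PySem.Chars.slice_eq_listSlice,
    PySem.List.slice_to_natCast, PySem.List.slice_from_natCast]
  simp only [show "0".toList = ['0'] from rfl, show "1".toList = ['1'] from rfl, count_single]
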